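-- pv_equiv track=rewrite | github.com/P0pzi/MC-PopziNet-Discord-Bot | models/message.py | cleanup_word
-- ===== SOURCE A (Python) =====
-- def cleanup_word(word):
--     replacements = {
--         "@": "a",
--         "$": "s",
--         "0": "o",
--         "3": "e",
--         "4": "a",
--         "+": "t",
--         "7": "t",
--         "?": "",
--         "!": "",
--         ".": "",
--         ",": "",
--     }
--
--     word = word.lower()
--     for char, replacement in replacements.items():
--         word = word.replace(char, replacement)
--     return word
-- ===== SOURCE B (Python) =====
-- def cleanup_word(word):
--     replacements = {
--         "@": "a",
--         "$": "s",
--         "0": "o",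
--         "3": "e",
--         "4": "a",
--         "+": "t",
--         "7": "t",
--         "?": "",
--         "!": "",
--         ".": "",
--         ",": "",
--     }
--     return "".join(replacements.get(c, c) for c in word.lower())
-- ===== Notes on version B (the rewrite author's own statement) =====
-- stated objective: alternative
-- what changed: B makes a single pass over the characters with one dict lookup per char instead of eleven sequential whole-string str.replace passes (trades C-level replace passes for one Python-level pass).
import Mathlib
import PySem

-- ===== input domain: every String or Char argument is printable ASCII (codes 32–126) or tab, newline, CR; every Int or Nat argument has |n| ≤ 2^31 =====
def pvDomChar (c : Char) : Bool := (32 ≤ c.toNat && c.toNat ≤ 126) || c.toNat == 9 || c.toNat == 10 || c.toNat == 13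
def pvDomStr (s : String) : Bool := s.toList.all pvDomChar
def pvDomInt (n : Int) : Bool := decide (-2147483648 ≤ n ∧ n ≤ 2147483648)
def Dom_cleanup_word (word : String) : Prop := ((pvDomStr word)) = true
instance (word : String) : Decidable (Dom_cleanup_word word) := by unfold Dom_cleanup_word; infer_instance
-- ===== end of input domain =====

-- B: a single pass over the characters with one dict lookup per char, instead of eleven sequential whole-string str.replace passes (alternative decomposition; not measured faster).

-- ===== PORT A =====
-- the dict literal `replacements`, in insertion order, as iterated by `.items()`
def pvReplacementsA : List (String × String) :=
  [("@", "a"), ("$", "s"), ("0", "o"), ("3", "e"), ("4", "a"), ("+", "t"), ("7", "t"),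
   ("?", ""), ("!", ""), (".", ""), (",", "")]

def cleanup_word (word : String) : String :=
  pvReplacementsA.foldl (fun w p => PySem.Str.replace w p.1 p.2) (PySem.Str.lower word)

-- ===== PORT B =====
-- the same dict literal, keyed by its (single-character) keys
def pvReplacementsB : PySem.Dict Char String :=
  ((((((((((PySem.Dict.empty.insert '@' "a").insert '$' "s").insert '0' "o").insert '3' "e").insert
      '4' "a").insert '+' "t").insert '7' "t").insert '?' "").insert '!' "").insert '.' "").insert ',' ""

def cleanup_word_alt (word : String) : String :=
  PySem.Str.join "" ((PySem.Str.lower word).toList.map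
    (fun c => pvReplacementsB.getD c (String.ofList [c])))

-- ===== PRECONDITION & SPEC =====
def Spec_cleanup_word (word : String) (out : String) : Prop := out = cleanup_word_alt word
instance (word : String) (out : String) : Decidable (Spec_cleanup_word word out) := by unfold Spec_cleanup_word; infer_instance

-- ===== CLAIM (what is proved, stated in full; the proofs are below) =====
def Claim_equal_cleanup_word : Prop := ∀ (word : String), Dom_cleanup_word word → Spec_cleanup_word word (cleanup_word word)

-- ===== LEMMAS AND PROOFS =====

-- one char-level replacement step, as a flatMap function
def pvStep (c : Char) (rep : List Char) : Char → List Char := fun x => if x = c then rep else [x]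

lemma pv_replace_go_single (c : Char) (rep : List Char) :
    ∀ (l : List Char) (fuel : Nat) (acc : List Char), l.length ≤ fuel →
      PySem.Chars.replace.go [c] rep fuel l acc = acc.reverse ++ l.flatMap (pvStep c rep) := by
  intro l
  induction l with
  | nil =>
    intro fuel acc _
    cases fuel <;> simp [PySem.Chars.replace.go]
  | cons x t ih =>
    intro fuel acc h
    cases fuel with
    | zero => simp at h
    | succ n =>
      simp only [PySem.Chars.replace.go]
      by_cases hx : x = c
      · subst hx
        have hpre : [x].isPrefixOf (x :: t) = true := by simp [List.isPrefixOf]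
        rw [if_pos hpre]
        simp only [List.length_cons] at h
        rw [show List.drop [x].length (x :: t) = t from rfl]
        rw [ih n (rep.reverse ++ acc) (by omega)]
        simp [pvStep]
      · have hpre : [c].isPrefixOf (x :: t) = false := by
          simp [List.isPrefixOf]
          exact fun hh => (hx hh.symm).elim
        rw [if_neg (by simp [hpre])]
        simp only [List.length_cons] at h
        rw [ih n (x :: acc) (by omega)]
        simp [pvStep, hx]

-- str.replace with a single-character pattern is a per-character flatMap
lemma pv_replace_single (cs : List Char) (c : Char) (rep : List Char) :
    PySem.Chars.replace cs [c] rep = cs.flatMap (pvStep c rep) := by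
  have : ([c].isEmpty) = false := rfl
  simp only [PySem.Chars.replace, this, Bool.false_eq_true, if_false]
  simpa using pv_replace_go_single c rep cs cs.length [] (le_refl _)

-- the composition of the eleven per-character steps equals one dict lookup
lemma pv_pointwise (x : Char) :
    ((((((((((pvStep '@' ['a'] x).flatMap (pvStep '$' ['s'])).flatMap (pvStep '0' ['o'])).flatMap
      (pvStep '3' ['e'])).flatMap (pvStep '4' ['a'])).flatMap (pvStep '+' ['t'])).flatMap
      (pvStep '7' ['t'])).flatMap (pvStep '?' [])).flatMap (pvStep '!' [])).flatMap
      (pvStep '.' [])).flatMap (pvStep ',' []) =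
    (pvReplacementsB.getD x (String.ofList [x])).toList := by
  by_cases h1 : x = '@'; · subst h1; decide
  by_cases h2 : x = '$'; · subst h2; decide
  by_cases h3 : x = '0'; · subst h3; decide
  by_cases h4 : x = '3'; · subst h4; decide
  by_cases h5 : x = '4'; · subst h5; decide
  by_cases h6 : x = '+'; · subst h6; decide
  by_cases h7 : x = '7'; · subst h7; decide
  by_cases h8 : x = '?'; · subst h8; decide
  by_cases h9 : x = '!'; · subst h9; decide
  by_cases h10 : x = '.'; · subst h10; decide
  by_cases h11 : x = ','; · subst h11; decide
  simp [pvStep, pvReplacementsB, PySem.Dict.getD_insert, String.toList_ofList,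
    h1, h2, h3, h4, h5, h6, h7, h8, h9, h10, h11]

lemma pv_join_nil_flatten (l : List (List Char)) : PySem.Chars.join [] l = l.flatten := by
  show List.intercalate [] l = l.flatten
  unfold List.intercalate
  induction l with
  | nil => rfl
  | cons a t ih =>
    cases t with
    | nil => rfl
    | cons b u =>
      rw [List.intersperse_cons₂] at *
      simp at *
      simpa using ih

-- ===== VERDICT (by name: the statement is the Claim_ definition above) =====
theorem cleanup_word_spec : Claim_equal_cleanup_word := by
  intro word _
  show cleanup_word word = cleanup_word_alt word
  apply String.toList_inj.mp
  have hA : (cleanup_word word).toList =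
      (((((((((((PySem.Str.lower word).toList.flatMap (pvStep '@' ['a'])).flatMap
        (pvStep '$' ['s'])).flatMap (pvStep '0' ['o'])).flatMap (pvStep '3' ['e'])).flatMap
        (pvStep '4' ['a'])).flatMap (pvStep '+' ['t'])).flatMap (pvStep '7' ['t'])).flatMap
        (pvStep '?' [])).flatMap (pvStep '!' [])).flatMap (pvStep '.' [])).flatMap
        (pvStep ',' []) := by
    simp only [cleanup_word, pvReplacementsA, List.foldl_cons, List.foldl_nil,
      PySem.Str.toList_replace,
      show ("@" : String).toList = ['@'] from rfl, show ("$" : String).toList = ['$'] from rfl,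
      show ("0" : String).toList = ['0'] from rfl, show ("3" : String).toList = ['3'] from rfl,
      show ("4" : String).toList = ['4'] from rfl, show ("+" : String).toList = ['+'] from rfl,
      show ("7" : String).toList = ['7'] from rfl, show ("?" : String).toList = ['?'] from rfl,
      show ("!" : String).toList = ['!'] from rfl, show ("." : String).toList = ['.'] from rfl,
      show ("," : String).toList = [','] from rfl, show ("a" : String).toList = ['a'] from rfl,
      show ("s" : String).toList = ['s'] from rfl, show ("o" : String).toList = ['o'] from rfl,
      show ("e" : String).toList = ['e'] from rfl, show ("t" : String).toList = ['t'] from rfl,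
      show ("" : String).toList = [] from rfl, pv_replace_single]
  have hB : (cleanup_word_alt word).toList =
      (PySem.Str.lower word).toList.flatMap
        (fun x => (pvReplacementsB.getD x (String.ofList [x])).toList) := by
    simp only [cleanup_word_alt, PySem.Str.toList_join,
      show ("" : String).toList = [] from rfl, pv_join_nil_flatten, List.map_map,
      List.flatten_eq_flatMap, List.flatMap_map, Function.comp, id_eq]
  rw [hA, hB]
  simp only [List.flatMap_assoc]
  exact congrArg (fun f => List.flatMap f (PySem.Str.lower word).toList)
    (funext fun x => by simpa only [List.flatMap_assoc] using pv_pointwise x)
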